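-- pv_equiv track=rewrite | github.com/krenak/BSI | 2024-2/prog2/exercicios/arquivo/libmatriz.py | rotEsq
-- ===== SOURCE A (Python) =====
-- def rotEsq(matriz):
--     for i in range(len(matriz)):
--         for j in range(len(matriz[i])):
--             if j == 0:
--                 x = matriz[i][j]
--             if j != (len(matriz[i]) - 1):
--                 matriz[i][j] = matriz[i][j + 1]
--             else:
--                 matriz[i][j] = x
--
--     return matriz
-- ===== SOURCE B (Python) =====
-- def rotEsq(matriz):
--     for i in range(len(matriz)):
--         matriz[i][:] = matriz[i][1:] + matriz[i][:1]
--     return matriz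
-- ===== Notes on version B (the rewrite author's own statement) =====
-- stated objective: idiomatic
-- what changed: Each row is rebuilt by a single slice assignment row[:] = row[1:] + row[:1] instead of shifting elements one by one with a saved temporary in an inner index loop.
import Mathlib
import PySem

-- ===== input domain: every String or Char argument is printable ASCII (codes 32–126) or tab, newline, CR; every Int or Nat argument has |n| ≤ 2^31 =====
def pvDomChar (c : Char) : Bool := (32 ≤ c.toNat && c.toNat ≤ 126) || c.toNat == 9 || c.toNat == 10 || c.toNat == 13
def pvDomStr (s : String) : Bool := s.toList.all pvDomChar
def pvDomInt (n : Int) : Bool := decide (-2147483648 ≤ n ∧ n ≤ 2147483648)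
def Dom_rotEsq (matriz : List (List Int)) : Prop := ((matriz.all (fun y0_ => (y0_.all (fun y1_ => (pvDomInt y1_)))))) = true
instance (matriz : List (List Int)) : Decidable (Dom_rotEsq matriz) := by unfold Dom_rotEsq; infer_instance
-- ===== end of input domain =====

-- B rotates each row left by one with a single slice assignment instead of A's
-- element-by-element shift with a saved temporary; in Python both A and B mutate
-- `matriz` in place, and the equivalence proved here is about the return value.

-- ===== PORT A =====
-- inner loop body: state (m, x); matriz[i][j] reads/writes go through pyGetD/pySetD
-- (every index produced by the ranges is in range, so the defaults are never used)
def rotEsqInner (i : Int) (st : List (List Int) × Int) (j : Int) : List (List Int) × Int :=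
  let m := st.1
  let x := if j = 0 then PySem.List.pyGetD (PySem.List.pyGetD m i []) j 0 else st.2
  let row := PySem.List.pyGetD m i []
  if j ≠ (row.length : Int) - 1 then
    (PySem.List.pySetD m i (PySem.List.pySetD row j (PySem.List.pyGetD row (j + 1) 0)), x)
  else
    (PySem.List.pySetD m i (PySem.List.pySetD row j x), x)

def rotEsq (matriz : List (List Int)) : List (List Int) :=
  (PySem.List.pyRange 0 matriz.length 1).foldl
    (fun m i =>
      ((PySem.List.pyRange 0 (PySem.List.pyGetD m i []).length 1).foldl
        (rotEsqInner i) (m, 0)).1)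
    matriz

-- ===== PORT B =====
-- matriz[i][:] = matriz[i][1:] + matriz[i][:1]
def rotEsq_alt (matriz : List (List Int)) : List (List Int) :=
  (PySem.List.pyRange 0 matriz.length 1).foldl
    (fun m i =>
      let row := PySem.List.pyGetD m i []
      PySem.List.pySetD m i
        (PySem.List.slice row (some 1) none ++ PySem.List.slice row none (some 1)))
    matriz

-- ===== PRECONDITION & SPEC =====
def Spec_rotEsq (matriz : List (List Int)) (out : List (List Int)) : Prop := out = rotEsq_alt matriz
instance (matriz : List (List Int)) (out : List (List Int)) : Decidable (Spec_rotEsq matriz out) := by unfold Spec_rotEsq; infer_instance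

-- ===== CLAIM (what is proved, stated in full; the proofs are below) =====
def Claim_equal_rotEsq : Prop := ∀ (matriz : List (List Int)), Dom_rotEsq matriz → Spec_rotEsq matriz (rotEsq matriz)

-- ===== LEMMAS AND PROOFS =====

lemma foldl_set_suffix (f : List (List Int) → Int → List (List Int))
    (g : List Int → List Int)
    (hf : ∀ (m : List (List Int)) (j : Nat), j < m.length → f m (j : Int) = m.set j (g (m.getD j [])))
    : ∀ (c s : Nat) (m : List (List Int)), s + c = m.length →
      (PySem.List.pyRange (s : Int) (m.length : Int) 1).foldl f m = m.take s ++ (m.drop s).map g := by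
  intro c
  induction c with
  | zero =>
      intro s m hs
      rw [PySem.List.pyRange_one_eq_nil (by omega)]
      rw [List.take_of_length_le (by omega), List.drop_of_length_le (by omega)]
      simp
  | succ c ih =>
      intro s m hs
      have hsN : s < m.length := by omega
      rw [PySem.List.pyRange_one_cons (by exact_mod_cast hsN)]
      simp only [List.foldl_cons]
      rw [hf m s hsN]
      have hlen : (m.set s (g (m.getD s []))).length = m.length := by simp
      have := ih (s + 1) (m.set s (g (m.getD s []))) (by omega)
      rw [hlen] at this
      have hcast : ((s : Int) + 1) = ((s + 1 : Nat) : Int) := by push_cast; ring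
      rw [hcast, this]
      have hget : m.getD s [] = m[s] := List.getD_eq_getElem m [] hsN
      rw [hget]
      rw [List.take_set, List.drop_set_of_lt (by omega)]
      rw [List.take_add_one, List.getElem?_eq_getElem hsN]
      have : (m.take s ++ [m[s]]).set s (g m[s]) = m.take s ++ [g m[s]] := by
        rw [List.set_append_right _ _ (by simp [hsN.le])]
        have hl : (List.take s m).length = s := by simp [hsN.le]
        rw [hl]
        simp
      simp only [Option.toList_some, this]
      rw [List.drop_eq_getElem_cons hsN, List.map_cons, List.append_assoc]
      rfl

lemma rot_step_set (row : List Int) (k : Nat) (hk1 : 1 ≤ k + 1) (hkn : k + 1 < row.length) :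
    (row.tail.take k ++ row.drop k).set k row[k + 1] = row.tail.take (k + 1) ++ row.drop (k + 1) := by
  have hlt : (row.tail.take k).length = k := by
    simp [List.length_tail]; omega
  rw [List.set_append_right _ _ (by omega), hlt, Nat.sub_self]
  have hd : row.drop k = row[k] :: row.drop (k + 1) := List.drop_eq_getElem_cons (by omega)
  rw [hd, List.set_cons_zero]
  rw [List.take_add_one, List.getElem?_eq_getElem (by simp [List.length_tail]; omega : k < row.tail.length)]
  simp [List.getElem_tail]

lemma inner_getD (row : List Int) (k : Nat) (hkn : k + 1 < row.length) :
    (row.tail.take k ++ row.drop k).getD (k + 1) 0 = row[k + 1] := by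
  have hlt : (row.tail.take k).length = k := by simp [List.length_tail]; omega
  have hlen : (row.tail.take k ++ row.drop k).length = row.length := by
    simp [List.length_tail]; omega
  rw [List.getD_eq_getElem _ _ (by omega)]
  rw [List.getElem_append_right (by omega)]
  simp [hlt, List.getElem_drop]

lemma inner_suffix (m0 : List (List Int)) (i : Nat) (hi : i < m0.length) (row : List Int) (x : Int) :
    ∀ (c k : Nat), 1 ≤ k → k + c + 1 = row.length →
      ((PySem.List.pyRange (k : Int) ((row.length : Nat) : Int) 1).foldl (rotEsqInner (i : Int))
        (m0.set i (row.tail.take k ++ row.drop k), x)).1 = m0.set i (row.tail ++ [x]) := by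
  intro c
  induction c with
  | zero =>
      intro k hk1 hkn
      have hn : row.length = k + 1 := by omega
      have hsing : PySem.List.pyRange (k : Int) ((row.length : Nat) : Int) 1 = [(k : Int)] := by
        rw [hn]; push_cast; exact PySem.List.pyRange_one_singleton _
      rw [hsing]
      simp only [List.foldl_cons, List.foldl_nil]
      have hcur : PySem.List.pyGetD (m0.set i (row.tail.take k ++ row.drop k)) (i : Int) []
          = row.tail.take k ++ row.drop k := by
        rw [PySem.List.pyGetD_natCast]
        rw [List.getD_eq_getElem _ _ (by simpa using hi)]
        simp
      have hclen : (row.tail.take k ++ row.drop k).length = row.length := by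
        simp [List.length_tail]; omega
      unfold rotEsqInner
      simp only [hcur, hclen]
      have h0 : ¬ ((k : Int) = 0) := by exact_mod_cast (by omega : ¬ (k = 0))
      have hlast : (k : Int) = ((row.length : Nat) : Int) - 1 := by rw [hn]; push_cast; ring
      rw [if_neg h0]
      rw [if_neg (by simp [hlast] : ¬ ((k : Int) ≠ ((row.length : Nat) : Int) - 1))]
      simp only [PySem.List.pySetD_natCast, List.set_set]
      congr 1
      have htk : row.tail.take k = row.tail := List.take_of_length_le (by simp [List.length_tail]; omega)
      rw [htk]
      rw [List.set_append_right _ _ (by simp [List.length_tail]; omega)]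
      have : k - row.tail.length = 0 := by simp [List.length_tail]; omega
      rw [this]
      rw [List.drop_eq_getElem_cons (by omega : k < row.length)]
      simp [List.drop_of_length_le (by omega : row.length ≤ k + 1)]
  | succ c ih =>
      intro k hk1 hkn
      have hkN : (k : Int) < ((row.length : Nat) : Int) := by exact_mod_cast (by omega : k < row.length)
      rw [PySem.List.pyRange_one_cons hkN]
      simp only [List.foldl_cons]
      have hcur : PySem.List.pyGetD (m0.set i (row.tail.take k ++ row.drop k)) (i : Int) []
          = row.tail.take k ++ row.drop k := by
        rw [PySem.List.pyGetD_natCast]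
        rw [List.getD_eq_getElem _ _ (by simpa using hi)]
        simp
      have hclen : (row.tail.take k ++ row.drop k).length = row.length := by
        simp [List.length_tail]; omega
      have h0 : ¬ ((k : Int) = 0) := by exact_mod_cast (by omega : ¬ (k = 0))
      have hne : ((k : Int) ≠ ((row.length : Nat) : Int) - 1) := by
        have : k ≠ row.length - 1 := by omega
        omega
      have hstep : rotEsqInner (i : Int) (m0.set i (row.tail.take k ++ row.drop k), x) (k : Int)
          = (m0.set i (row.tail.take (k + 1) ++ row.drop (k + 1)), x) := by
        unfold rotEsqInner
        simp only [hcur, hclen, if_neg h0, if_pos hne, PySem.List.pySetD_natCast,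
          Int.toNat_natCast, List.set_set]
        have hc1 : (k : Int) + 1 = ((k + 1 : Nat) : Int) := by push_cast; ring
        rw [hc1, PySem.List.pyGetD_natCast]
        rw [inner_getD row k (by omega)]
        rw [rot_step_set row k (by omega) (by omega)]
      rw [hstep]
      have hc1 : (k : Int) + 1 = ((k + 1 : Nat) : Int) := by push_cast; ring
      rw [hc1]
      exact ih (k + 1) (by omega) (by omega)

lemma inner_full (m : List (List Int)) (i : Nat) (hi : i < m.length) :
    ((PySem.List.pyRange 0 (((m.getD i []).length : Nat) : Int) 1).foldl (rotEsqInner (i : Int)) (m, 0)).1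
      = m.set i ((m.getD i []).tail ++ (m.getD i []).take 1) := by
  have hget : m.getD i [] = m[i] := List.getD_eq_getElem m [] hi
  rw [hget]
  match hrow : m[i] with
  | [] =>
      rw [PySem.List.pyRange_one_eq_nil (by simp)]
      simp only [List.foldl_nil, List.tail_nil, List.take_nil, List.append_nil]
      calc m = m.set i m[i] := (List.set_getElem_self hi).symm
        _ = m.set i [] := by rw [hrow]
  | [a] =>
      have h1 : PySem.List.pyRange 0 (((1:Nat) : Int)) 1 = [0] := by decide
      simp only [List.length_cons, List.length_nil, h1, List.foldl_cons, List.foldl_nil]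
      simp only [rotEsqInner, PySem.List.pyGetD_natCast, hget, hrow]
      norm_num [PySem.List.pySetD_of_nonneg]
  | a :: b :: t =>
      have hlen : (a :: b :: t).length = t.length + 2 := by simp
      have h0n : (0 : Int) < (((a :: b :: t).length : Nat) : Int) := by
        exact_mod_cast (by omega : 0 < (a :: b :: t).length)
      rw [PySem.List.pyRange_one_cons h0n]
      simp only [List.foldl_cons]
      have hstep : rotEsqInner (i : Int) (m, 0) 0 = (m.set i (b :: b :: t), a) := by
        simp only [rotEsqInner, PySem.List.pyGetD_natCast, hget, hrow]
        have hne : (0 : Int) ≠ (((a :: b :: t).length : Nat) : Int) - 1 := by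
          have : (0:Nat) ≠ (a :: b :: t).length - 1 := by simp [hlen]
          omega
        rw [if_pos hne]
        simp [pysem]
      rw [hstep]
      have h01 : (0 : Int) + 1 = ((1 : Nat) : Int) := by norm_num
      rw [h01]
      have := inner_suffix m i hi (a :: b :: t) a t.length 1 (by omega) (by simp; omega)
      simp only [List.tail_cons, List.take_succ_cons, List.take_zero, List.drop_succ_cons,
        List.drop_zero, List.singleton_append, List.cons_append, List.nil_append] at this ⊢
      rw [this]


theorem rotEsq_eq_alt (matriz : List (List Int)) : rotEsq matriz = rotEsq_alt matriz := by
  unfold rotEsq rotEsq_alt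
  have hA := foldl_set_suffix
      (fun m i =>
        ((PySem.List.pyRange 0 (PySem.List.pyGetD m i []).length 1).foldl
          (rotEsqInner i) (m, 0)).1)
      (fun r => r.tail ++ r.take 1)
      (by
        intro m j hj
        simp only [PySem.List.pyGetD_natCast]
        exact inner_full m j hj)
      matriz.length 0 matriz (by omega)
  have hB := foldl_set_suffix
      (fun m i =>
        let row := PySem.List.pyGetD m i []
        PySem.List.pySetD m i
          (PySem.List.slice row (some 1) none ++ PySem.List.slice row none (some 1)))
      (fun r => r.tail ++ r.take 1)
      (by
        intro m j hj
        simp only [PySem.List.pyGetD_natCast, PySem.List.pySetD_natCast,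
          PySem.List.slice_from_one]
        simp [pysem])
      matriz.length 0 matriz (by omega)
  simp only [Nat.cast_zero] at hA hB
  rw [hA, hB]

-- ===== VERDICT (by name: the statement is the Claim_ definition above) =====
theorem rotEsq_spec : Claim_equal_rotEsq := by
  intro matriz _
  unfold Spec_rotEsq
  exact rotEsq_eq_alt matriz
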